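-- pv_equiv track=rewrite | github.com/glenstewart3/WellTrack | backend/routes/auth.py | _role_for_payroll_class
-- ===== SOURCE A (Python) =====
-- _STAFF_ROLE_RULES = [
--     ("CES",   "screener"),     # Cover ES staff
--     ("CLASS", "teacher"),      # Classroom teacher
--     ("LEARN", "teacher"),      # Learning specialist
--     ("LEAD",  "teacher"),      # Leading teacher
--     ("PAR",   "teacher"),      # Paraprofessional
--     ("AP",    "leadership"),   # Assistant principal
--     ("PR",    "leadership"),   # Principal
--     ("ES",    "screener"),     # Education support
-- ]
--
-- def _role_for_payroll_class(payroll_class: str):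
--     """Return the mapped role (e.g. 'teacher') or None if no prefix matches.
--     Longer prefixes checked first so 'CES' doesn't get mis-matched as 'ES'."""
--     if not payroll_class:
--         return None
--     pc = payroll_class.strip().upper()
--     for prefix, role in sorted(_STAFF_ROLE_RULES, key=lambda x: -len(x[0])):
--         if pc.startswith(prefix):
--             return role
--     return None
-- ===== SOURCE B (Python) =====
-- _STAFF_ROLE_RULES = [
--     ("CES",   "screener"),     # Cover ES staff
--     ("CLASS", "teacher"),      # Classroom teacher
--     ("LEARN", "teacher"),      # Learning specialist
--     ("LEAD",  "teacher"),      # Leading teacher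
--     ("PAR",   "teacher"),      # Paraprofessional
--     ("AP",    "leadership"),   # Assistant principal
--     ("PR",    "leadership"),   # Principal
--     ("ES",    "screener"),     # Education support
-- ]
--
-- _PREFIX_ROLE = dict(_STAFF_ROLE_RULES)
-- _PREFIX_LENGTHS = sorted({len(k) for k in _PREFIX_ROLE}, reverse=True)
--
-- def _role_for_payroll_class(payroll_class: str):
--     """Hash-lookup version: try the distinct prefix lengths longest-first and
--     look the slice up in a dict instead of scanning the rule list."""
--     if not payroll_class:
--         return None
--     pc = payroll_class.strip().upper()
--     for L in _PREFIX_LENGTHS: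
--         role = _PREFIX_ROLE.get(pc[:L])
--         if role is not None:
--             return role
--     return None
-- ===== Notes on version B (the rewrite author's own statement) =====
-- stated objective: idiomatic
-- what changed: Replaces the per-call sort of the rule list and the linear startswith scan by a precomputed prefix->role dict plus a longest-first loop over the distinct prefix lengths, looking the slice up by hash.
import Mathlib
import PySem

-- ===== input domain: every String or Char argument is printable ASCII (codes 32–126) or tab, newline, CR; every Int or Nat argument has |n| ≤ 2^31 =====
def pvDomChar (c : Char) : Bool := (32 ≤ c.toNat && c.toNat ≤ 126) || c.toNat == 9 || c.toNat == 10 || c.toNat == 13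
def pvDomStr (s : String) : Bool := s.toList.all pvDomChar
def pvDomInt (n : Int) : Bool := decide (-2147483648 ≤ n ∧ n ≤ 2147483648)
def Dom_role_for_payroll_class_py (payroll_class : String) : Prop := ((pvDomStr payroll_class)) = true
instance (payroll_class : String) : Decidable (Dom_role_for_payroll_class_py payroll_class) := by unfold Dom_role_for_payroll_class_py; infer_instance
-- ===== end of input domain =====

set_option maxHeartbeats 2000000


-- B replaces the scan over the length-sorted rule list (startswith per rule) by a dict of
-- prefix→role plus a longest-first loop over the distinct prefix lengths with a hash lookup
-- of the slice (objective: idiomatic). Return values proved equal on all inputs.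

-- ===== PORT A =====
def pvRules : List (String × String) :=
  [("CES","screener"),("CLASS","teacher"),("LEARN","teacher"),("LEAD","teacher"),
   ("PAR","teacher"),("AP","leadership"),("PR","leadership"),("ES","screener")]

def pvFindA (pc : String) : List (String × String) → Option String
  | [] => none
  | (p, role) :: rest => if PySem.Str.startswith pc p then some role else pvFindA pc rest

def role_for_payroll_class_py (payroll_class : String) : Option String :=
  if payroll_class = "" then none
  else
    let pc := PySem.Str.upper (PySem.Str.strip payroll_class)
    pvFindA pc (PySem.List.sorted pvRules (fun x => -(PySem.Str.len x.1 : Int)) false)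

-- ===== PORT B =====
def pvPrefixRole : PySem.Dict String String := PySem.Dict.ofList pvRules

def pvPrefixLengths : List Int :=
  PySem.List.sorted (PySem.Set.ofList (pvPrefixRole.keys.map (fun k => (PySem.Str.len k : Int))))
    (fun x => x) true

def pvFindB (pc : String) : List Int → Option String
  | [] => none
  | L :: rest =>
    match pvPrefixRole.get? (PySem.Str.slice pc none (some L)) with
    | some role => some role
    | none => pvFindB pc rest

def role_for_payroll_class_py_alt (payroll_class : String) : Option String :=
  if payroll_class = "" then none
  else pvFindB (PySem.Str.upper (PySem.Str.strip payroll_class)) pvPrefixLengths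

-- ===== PRECONDITION & SPEC =====
def Spec_role_for_payroll_class_py (payroll_class : String) (out : Option String) : Prop := out = role_for_payroll_class_py_alt payroll_class
instance (payroll_class : String) (out : Option String) : Decidable (Spec_role_for_payroll_class_py payroll_class out) := by unfold Spec_role_for_payroll_class_py; infer_instance

-- ===== CLAIM (what is proved, stated in full; the proofs are below) =====
def Claim_equal_role_for_payroll_class_py : Prop := ∀ (payroll_class : String), Dom_role_for_payroll_class_py payroll_class → Spec_role_for_payroll_class_py payroll_class (role_for_payroll_class_py payroll_class)

-- ===== LEMMAS AND PROOFS =====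

-- The stable sort of the rules by descending prefix length, as a literal.
theorem pvSorted_rules_eq :
    PySem.List.sorted pvRules (fun x => -(PySem.Str.len x.1 : Int)) false =
    [("CLASS","teacher"),("LEARN","teacher"),("LEAD","teacher"),("CES","screener"),
     ("PAR","teacher"),("AP","leadership"),("PR","leadership"),("ES","screener")] := by decide

-- The distinct key lengths, sorted descending, as a literal.
theorem pvPrefixLengths_eq : pvPrefixLengths = [5,4,3,2] := by decide

-- Core: the rule scan and the length/lookup loop agree on every (stripped, uppercased) string.
theorem pvFind_eq (pc : String) : pvFindA pc
    [("CLASS","teacher"),("LEARN","teacher"),("LEAD","teacher"),("CES","screener"),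
     ("PAR","teacher"),("AP","leadership"),("PR","leadership"),("ES","screener")]
    = pvFindB pc [5,4,3,2] := by
  have hsl : ∀ (t : List Char) (n : Nat), PySem.List.slice t none (some (n : Int)) = t.take n := by
    intro t n; exact PySem.List.slice_to_natCast t n
  have hnil : ∀ k : String, (PySem.Dict.mk ([] : List (String × String))).get? k = none := by
    intro k; rfl
  simp only [pvFindA, pvFindB, show pvPrefixRole = PySem.Dict.mk pvRules from by decide,
    pvRules, PySem.Dict.get?_mk_cons, beq_iff_eq, ← String.toList_inj,
    PySem.Str.toList_slice, PySem.Chars.slice_eq_listSlice,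
    PySem.Str.startswith_eq, PySem.Chars.startswith_iff, List.prefix_iff_eq_take,
    show ((5:Int)) = ((5:Nat):Int) from rfl, show ((4:Int)) = ((4:Nat):Int) from rfl,
    show ((3:Int)) = ((3:Nat):Int) from rfl, show ((2:Int)) = ((2:Nat):Int) from rfl,
    hsl, hnil,
    show "CLASS".toList = ['C','L','A','S','S'] from rfl,
    show "LEARN".toList = ['L','E','A','R','N'] from rfl,
    show "LEAD".toList = ['L','E','A','D'] from rfl,
    show "CES".toList = ['C','E','S'] from rfl,
    show "PAR".toList = ['P','A','R'] from rfl,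
    show "AP".toList = ['A','P'] from rfl,
    show "PR".toList = ['P','R'] from rfl,
    show "ES".toList = ['E','S'] from rfl,
    List.length_cons, List.length_nil]
  generalize pc.toList = t
  match t with
  | [] => simp
  | [a] => simp
  | [a,b] => simp; split_ifs <;> simp_all
  | [a,b,c] => simp; split_ifs <;> simp_all
  | [a,b,c,d] => simp; split_ifs <;> simp_all
  | a::b::c::d::e::rest => simp; split_ifs <;> simp_all

-- ===== VERDICT (by name: the statement is the Claim_ definition above) =====
theorem role_for_payroll_class_py_spec : Claim_equal_role_for_payroll_class_py := by
  intro payroll_class _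
  unfold Spec_role_for_payroll_class_py role_for_payroll_class_py role_for_payroll_class_py_alt
  by_cases h : payroll_class = ""
  · simp [h]
  · rw [if_neg h, if_neg h]
    show pvFindA _ _ = _
    rw [pvSorted_rules_eq, pvPrefixLengths_eq]
    exact pvFind_eq _
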